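-- pv_equiv track=rewrite | github.com/Lgonzalez36/Python3-Folder | exersice 1.py | findMinLocation
-- ===== SOURCE A (Python) =====
-- def findMinLocation(someList):
--     min = someList[0]
--     loc = 0
--     for i in range (0,10,1):
--        if (someList[i] < min):
--            min = someList[i]
--            loc = i
--     return loc
-- ===== SOURCE B (Python) =====
-- def findMinLocation(someList):
--     values = [someList[i] for i in range(10)]
--     return values.index(min(values))
-- ===== Notes on version B (the rewrite author's own statement) =====
-- stated objective: simpler
-- what changed: Instead of one combined scan maintaining a (min, loc) pair, B materialises the ten inspected values and finds the answer in two separate passes: min() computes the minimum, then .index() locates its first occurrence.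
import Mathlib
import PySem

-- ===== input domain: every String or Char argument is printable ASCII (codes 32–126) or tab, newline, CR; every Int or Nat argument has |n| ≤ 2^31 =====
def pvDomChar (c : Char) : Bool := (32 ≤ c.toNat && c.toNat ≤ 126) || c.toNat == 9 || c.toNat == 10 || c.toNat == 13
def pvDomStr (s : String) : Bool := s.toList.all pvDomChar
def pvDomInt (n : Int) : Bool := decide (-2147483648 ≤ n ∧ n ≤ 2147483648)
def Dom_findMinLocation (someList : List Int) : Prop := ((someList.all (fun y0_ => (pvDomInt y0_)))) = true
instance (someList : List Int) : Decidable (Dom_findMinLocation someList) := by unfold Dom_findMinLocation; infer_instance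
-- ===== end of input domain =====

-- B replaces A's single scan carrying a (min, loc) pair by two independent passes
-- (min of the ten values, then first index of that minimum); return values agree on Pre_.

-- ===== PORT A =====
-- single loop over range(0,10,1) maintaining the running minimum and its location
def findMinLocation (someList : List Int) : Int :=
  let init : Int × Int := (PySem.List.pyGetD someList 0 0, 0)
  let st := (PySem.List.pyRange 0 10 1).foldl
    (fun (p : Int × Int) i =>
      if PySem.List.pyGetD someList i 0 < p.1 then (PySem.List.pyGetD someList i 0, i) else p)
    init
  st.2

-- ===== PORT B =====
-- values = [someList[i] for i in range(10)]; return values.index(min(values))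
def findMinLocation_alt (someList : List Int) : Int :=
  let values := (PySem.List.pyRange 0 10 1).map (fun i => PySem.List.pyGetD someList i 0)
  match PySem.List.min? values (fun x => x) with
  | some m =>
      match PySem.List.index? values m with
      | some k => (k : Int)
      | none => 0
  | none => 0

-- ===== PRECONDITION & SPEC =====
-- Pre_ excludes exactly the inputs on which A raises IndexError (fewer than 10 elements);
-- B raises there too.
def Pre_findMinLocation (someList : List Int) : Prop := 10 ≤ someList.length
instance (someList : List Int) : Decidable (Pre_findMinLocation someList) := by
  unfold Pre_findMinLocation; infer_instance
def pvWitness_findMinLocation : List Int := [3, 1, 4, 1, 5, 9, 2, 6, 5, 3]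
def Spec_findMinLocation (someList : List Int) (out : Int) : Prop := out = findMinLocation_alt someList
instance (someList : List Int) (out : Int) : Decidable (Spec_findMinLocation someList out) := by unfold Spec_findMinLocation; infer_instance

-- ===== CLAIM (what is proved, stated in full; the proofs are below) =====
def Claim_equal_findMinLocation : Prop := ∀ (someList : List Int), Dom_findMinLocation someList → Pre_findMinLocation someList → Spec_findMinLocation someList (findMinLocation someList)

-- ===== LEMMAS AND PROOFS =====

theorem foldl_min_le_init (t : List Int) (x : Int) : t.foldl min x ≤ x := by
  induction t generalizing x with
  | nil => simp
  | cons a t ih =>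
      simp only [List.foldl_cons]
      exact le_trans (ih (min x a)) (min_le_left x a)

theorem foldl_min_mem (t : List Int) (x : Int) : t.foldl min x = x ∨ t.foldl min x ∈ t := by
  induction t generalizing x with
  | nil => simp
  | cons a t ih =>
      simp only [List.foldl_cons]
      rcases ih (min x a) with h | h
      · rcases min_choice x a with hc | hc
        · left; rw [h, hc]
        · right; rw [h, hc]; exact List.mem_cons_self
      · right; exact List.mem_cons_of_mem _ h

-- A's loop invariant: folding A's step over the enumerated tail yields the running
-- minimum and the location of its first strict improvement.
theorem aloop_inv (t : List Int) (s m loc : Int) :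
    (PySem.List.enumerate t s).foldl
        (fun (p : Int × Int) iv => if iv.2 < p.1 then (iv.2, iv.1) else p) (m, loc)
      = (t.foldl min m,
         if t.foldl min m < m
         then s + (((PySem.List.index? t (t.foldl min m)).getD 0 : Nat) : Int)
         else loc) := by
  induction t generalizing s m loc with
  | nil => simp
  | cons a t ih =>
      have hle : t.foldl min (min m a) ≤ min m a := foldl_min_le_init t (min m a)
      simp only [PySem.List.enumerate, List.foldl_cons]
      by_cases ha : a < m
      · simp only [if_pos ha]
        rw [ih]
        have hmin : min m a = a := min_eq_right (le_of_lt ha)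
        rw [hmin]
        by_cases hM : t.foldl min a < a
        · have hne : a ≠ t.foldl min a := (ne_of_lt hM).symm
          have hmem : t.foldl min a ∈ t := by
            rcases foldl_min_mem t a with h | h
            · exact absurd h (ne_of_lt hM)
            · exact h
          obtain ⟨k, hk⟩ := Option.isSome_iff_exists.mp ((PySem.List.index?_isSome_iff t (t.foldl min a)).mpr hmem)
          rw [PySem.List.index?_cons_of_ne t hne, hk]
          have hMm : t.foldl min a < m := lt_trans hM ha
          simp [if_pos hM, if_pos hMm]
          ring
        · have hM' : t.foldl min a = a := le_antisymm (hmin ▸ hle) (not_lt.mp hM)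
          rw [hM', PySem.List.index?_cons_self]
          simp [ha]
      · simp only [if_neg ha]
        rw [ih]
        have hmin : min m a = m := min_eq_left (not_lt.mp ha)
        rw [hmin]
        by_cases hM : t.foldl min m < m
        · have hne : a ≠ t.foldl min m := by
            intro h; rw [← h] at hM; exact ha (lt_of_lt_of_le hM (le_refl m)) |>.elim
          have hmem : t.foldl min m ∈ t := by
            rcases foldl_min_mem t m with h | h
            · exact absurd h (ne_of_lt hM)
            · exact h
          obtain ⟨k, hk⟩ := Option.isSome_iff_exists.mp ((PySem.List.index?_isSome_iff t (t.foldl min m)).mpr hmem)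
          rw [PySem.List.index?_cons_of_ne t hne, hk]
          simp [if_pos hM]
          ring
        · simp [if_neg hM]

-- A's fold over the index range equals the fold of the same step over the enumerated values.
theorem afold_eq_enum (l : List Int) :
    (PySem.List.pyRange 0 10 1).foldl
        (fun (p : Int × Int) i =>
          if PySem.List.pyGetD l i 0 < p.1 then (PySem.List.pyGetD l i 0, i) else p)
        (PySem.List.pyGetD l 0 0, 0)
      = (PySem.List.enumerate ((PySem.List.pyRange 0 10 1).map (fun i => PySem.List.pyGetD l i 0)) 0).foldl
          (fun (p : Int × Int) iv => if iv.2 < p.1 then (iv.2, iv.1) else p)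
          (PySem.List.pyGetD l 0 0, 0) := by
  have hlen : PySem.List.len ((PySem.List.pyRange 0 10 1).map (fun i => PySem.List.pyGetD l i 0)) = 10 := by
    simp [PySem.List.len, PySem.List.length_pyRange_one]
  rw [PySem.List.enumerate_eq_map_pyRange _ (0 : Int), hlen, List.foldl_map]
  refine (PySem.List.foldl_congr_mem _ _ _ _ ?_).symm
  intro acc x hx
  obtain ⟨hx0, hx10⟩ := PySem.List.mem_pyRange_one.mp hx
  rw [PySem.List.pyGetD_map_pyRange_of_nonneg _ _ _ _ hx0 hx10]

theorem findMinLocation_spec : Claim_equal_findMinLocation := by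
  intro l _ _
  unfold Spec_findMinLocation findMinLocation findMinLocation_alt
  simp only []
  rw [afold_eq_enum l]
  have hcons : PySem.List.pyRange 0 10 1 = 0 :: PySem.List.pyRange 1 10 1 :=
    PySem.List.pyRange_one_cons (by norm_num)
  rw [hcons]
  simp only [List.map_cons, PySem.List.enumerate, List.foldl_cons, lt_self_iff_false, if_false,
    zero_add]
  rw [aloop_inv _ 1 (PySem.List.pyGetD l 0 0) 0, PySem.List.min?_id_cons]
  by_cases h :
      ((PySem.List.pyRange 1 10 1).map (fun i => PySem.List.pyGetD l i 0)).foldl min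
        (PySem.List.pyGetD l 0 0) < PySem.List.pyGetD l 0 0
  · have hne : PySem.List.pyGetD l 0 0 ≠
        ((PySem.List.pyRange 1 10 1).map (fun i => PySem.List.pyGetD l i 0)).foldl min
          (PySem.List.pyGetD l 0 0) := (ne_of_lt h).symm
    have hmem : ((PySem.List.pyRange 1 10 1).map (fun i => PySem.List.pyGetD l i 0)).foldl min
        (PySem.List.pyGetD l 0 0) ∈ (PySem.List.pyRange 1 10 1).map (fun i => PySem.List.pyGetD l i 0) := by
      rcases foldl_min_mem ((PySem.List.pyRange 1 10 1).map (fun i => PySem.List.pyGetD l i 0))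
          (PySem.List.pyGetD l 0 0) with hcase | hcase
      · exact absurd hcase.symm hne
      · exact hcase
    obtain ⟨k, hk⟩ := Option.isSome_iff_exists.mp
      ((PySem.List.index?_isSome_iff _ _).mpr hmem)
    simp only [PySem.List.index?_cons_of_ne _ hne, hk, Option.map_some]
    simp [h]
    ring
  · have hMeq : ((PySem.List.pyRange 1 10 1).map (fun i => PySem.List.pyGetD l i 0)).foldl min
        (PySem.List.pyGetD l 0 0) = PySem.List.pyGetD l 0 0 :=
      le_antisymm (foldl_min_le_init _ _) (not_lt.mp h)
    simp only [hMeq, PySem.List.index?_cons_self]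
    simp

-- ===== VERDICT (by name: the statement is the Claim_ definition above) =====
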